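-- pv_equiv track=rewrite | github.com/GKay-Dev/Advent-of-Code-2025 | Day03/solution_ai.py | best_two_digit_subsequence
-- ===== SOURCE A (Python) =====
-- def best_two_digit_subsequence(bank: str) -> int:
--     """
--     Pick the lexicographically largest 2-digit subsequence preserving order.
--     Uses suffix maximum array for O(n) time complexity.
--     Example: '9275' -> '97', '321' -> '32'
--     """
--     n = len(bank)
--     if n == 0:
--         return 0
--     if n == 1:
--         return int(bank)
--
--     # Precompute suffix maximum digit at each position
--     suffix_max = [''] * n
--     suffix_max[-1] = bank[-1]
--     for i in range(n - 2, -1, -1):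
--         suffix_max[i] = max(bank[i], suffix_max[i + 1])
--
--     # Find the lexicographically largest 2-digit pair
--     best = None
--     for i in range(n - 1):
--         first = bank[i]
--         second = suffix_max[i + 1]  # Best digit after position i
--         candidate = first + second
--         if best is None or candidate > best:
--             best = candidate
--
--     # Fallback for edge cases
--     if best is None:
--         best = bank[-2] + bank[-1]
--     return int(best)
-- ===== SOURCE B (Python) =====
-- def best_two_digit_subsequence(bank: str) -> int:
--     n = len(bank)
--     if n == 0:
--         return 0
--     if n == 1:
--         return int(bank)
--     # first digit: the max char that still has a successor; take its FIRST occurrence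
--     m = max(bank[:-1])
--     idx = bank.index(m)
--     # second digit: the max char after that occurrence
--     second = max(bank[idx + 1:])
--     return int(m + second)
-- ===== Notes on version B (the rewrite author's own statement) =====
-- stated objective: simpler
-- what changed: Replaces A's suffix-maximum array plus a full sweep over all candidate pairs with a direct two-stage greedy: one max over bank[:-1] picks the first digit at its first occurrence, one max over the remaining suffix picks the second digit.
-- outside the precondition, e.g. on best_two_digit_subsequence('+9'): A returns 9, B returns 9; on best_two_digit_subsequence('-5'): A returns -5, B returns -5
import Mathlib
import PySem

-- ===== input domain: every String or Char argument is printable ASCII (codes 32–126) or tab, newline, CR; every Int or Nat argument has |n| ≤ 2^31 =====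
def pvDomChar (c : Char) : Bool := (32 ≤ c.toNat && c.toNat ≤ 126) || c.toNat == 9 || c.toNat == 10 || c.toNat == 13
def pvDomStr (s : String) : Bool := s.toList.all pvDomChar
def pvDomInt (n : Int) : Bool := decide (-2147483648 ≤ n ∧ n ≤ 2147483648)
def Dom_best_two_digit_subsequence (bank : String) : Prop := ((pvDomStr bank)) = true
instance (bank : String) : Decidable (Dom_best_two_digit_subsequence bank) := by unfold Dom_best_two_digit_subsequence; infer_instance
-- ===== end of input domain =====

-- B replaces A's suffix-max array + full candidate sweep by a two-stage greedy (max of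
-- bank[:-1] at its first occurrence, then max of the suffix after it): simpler, same O(n).

-- ===== PORT A =====
-- suffix_max is filled from the back (suffix_max[i] := max(bank[i], suffix_max[i+1])); the
-- port models the array by PREPENDING each newly written cell, so acc.headD is suffix_max[i+1].
def pvA_smStep (cs : List Char) (acc : List Char) (i : Int) : List Char :=
  (max (PySem.List.pyGetD cs i ' ') (acc.headD ' ')) :: acc

def pvA_sm (cs : List Char) : List Char :=
  (PySem.List.pyRange ((cs.length : Int) - 2) (-1) (-1)).foldl (pvA_smStep cs)
    [PySem.List.pyGetD cs (-1) ' ']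

-- candidate = bank[i] + suffix_max[i+1]; 'candidate > best' is Python's lexicographic
-- comparison of the two 2-char strings, written out on the pair of chars
def pvA_bestStep (cs sm : List Char) (best : Option (Char × Char)) (i : Int) : Option (Char × Char) :=
  let first := PySem.List.pyGetD cs i ' '
  let second := PySem.List.pyGetD sm (i + 1) ' '
  match best with
  | none => some (first, second)
  | some b => if b.1 < first ∨ (b.1 = first ∧ b.2 < second) then some (first, second) else some b

def best_two_digit_subsequence (bank : String) : Int :=
  let cs := bank.toList
  if cs.length = 0 then 0
  else if cs.length = 1 then (PySem.Int.ofStr? bank).getD 0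
  else
    match (PySem.List.pyRange 0 ((cs.length : Int) - 1) 1).foldl (pvA_bestStep cs (pvA_sm cs)) none with
    | none => (PySem.Int.ofChars? [PySem.List.pyGetD cs (-2) ' ', PySem.List.pyGetD cs (-1) ' ']).getD 0
    | some b => (PySem.Int.ofChars? [b.1, b.2]).getD 0

-- ===== PORT B =====
def best_two_digit_subsequence_alt (bank : String) : Int :=
  let cs := bank.toList
  if cs.length = 0 then 0
  else if cs.length = 1 then (PySem.Int.ofStr? bank).getD 0
  else
    let m := (PySem.List.max? (PySem.List.slice cs none (some (-1))) (fun c => c)).getD ' '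
    let idx := (PySem.List.index? cs m).getD 0
    let second := (PySem.List.max? (PySem.List.slice cs (some ((idx : Int) + 1)) none) (fun c => c)).getD ' '
    (PySem.Int.ofChars? [m, second]).getD 0

-- ===== PRECONDITION & SPEC =====
-- Pre_ admits exactly the inputs on which Python A returns, stated in closed form: the empty
-- string; a single int-like character; or length ≥ 2 over digits and whitespace with at least
-- one digit (then the chosen 2-char candidate always parses). It excludes strings with signs
-- or other punctuation, where int() raises ValueError on the candidate except in rare sign
-- cases (e.g. '+9'), on which A and B still choose the same candidate and return the same value.
def Pre_best_two_digit_subsequence (bank : String) : Prop :=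
  (bank.toList.length ≤ 1 ∧ (bank.toList = [] ∨ (PySem.Int.ofStr? bank).isSome = true))
  ∨ (2 ≤ bank.toList.length
      ∧ bank.toList.all (fun c => c.isDigit || c == ' ' || c == '\t' || c == '\n' || c == '\r') = true
      ∧ bank.toList.any (fun c => c.isDigit) = true)
instance (bank : String) : Decidable (Pre_best_two_digit_subsequence bank) := by
  unfold Pre_best_two_digit_subsequence; infer_instance
def pvWitness_best_two_digit_subsequence : String := "9275"
def Spec_best_two_digit_subsequence (bank : String) (out : Int) : Prop := out = best_two_digit_subsequence_alt bank
instance (bank : String) (out : Int) : Decidable (Spec_best_two_digit_subsequence bank out) := by unfold Spec_best_two_digit_subsequence; infer_instance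

-- ===== CLAIM (what is proved, stated in full; the proofs are below) =====
def Claim_equal_best_two_digit_subsequence : Prop := ∀ (bank : String), Dom_best_two_digit_subsequence bank → Pre_best_two_digit_subsequence bank → Spec_best_two_digit_subsequence bank (best_two_digit_subsequence bank)

-- ===== LEMMAS AND PROOFS =====

-- suffix-maxima list: pvSmL l is Python's suffix_max array for l
def pvSmL : List Char → List Char
  | [] => []
  | c :: rest => (max c ((pvSmL rest).headD c)) :: pvSmL rest

-- max of a list with a default for []
def pvMaxD (l : List Char) (d : Char) : Char :=
  match l with
  | [] => d
  | c :: t => t.foldl max c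

theorem pvHeadD_congr {α : Type} (l : List α) (h : l ≠ []) (d d' : α) : l.headD d = l.headD d' := by
  cases l with
  | nil => exact absurd rfl h
  | cons x t => rfl

theorem pvFoldlMaxPull (t : List Char) (c r : Char) :
    max c (t.foldl max r) = t.foldl max (max c r) := by
  induction t generalizing r with
  | nil => rfl
  | cons x t ih =>
    simp only [List.foldl_cons]
    rw [ih, ← max_assoc]

theorem pvMaxD_cons (c : Char) (rest : List Char) (h : rest ≠ []) (d d' : Char) :
    pvMaxD (c :: rest) d = max c (pvMaxD rest d') := by
  cases rest with
  | nil => exact absurd rfl h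
  | cons r t =>
    simp only [pvMaxD, List.foldl_cons]
    exact (pvFoldlMaxPull t c r).symm

theorem pvMaxD_mem (l : List Char) (h : l ≠ []) (d : Char) : pvMaxD l d ∈ l := by
  cases l with
  | nil => exact absurd rfl h
  | cons c t =>
    rcases PySem.List.foldl_max_mem t c with h1 | h1
    · simp [pvMaxD, h1]
    · simp [pvMaxD, List.mem_cons, h1]

theorem pvLe_maxD (l : List Char) (d : Char) (y : Char) (hy : y ∈ l) : y ≤ pvMaxD l d := by
  cases l with
  | nil => simp at hy
  | cons c t =>
    rcases PySem.List.le_foldl_max t c with ⟨h1, h2⟩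
    rcases List.mem_cons.mp hy with rfl | hmem
    · exact h1
    · exact h2 y hmem

theorem pvSmL_ne_nil (l : List Char) (h : l ≠ []) : pvSmL l ≠ [] := by
  cases l with
  | nil => exact absurd rfl h
  | cons c t => simp [pvSmL]

theorem pvSmL_length (l : List Char) : (pvSmL l).length = l.length := by
  induction l with
  | nil => rfl
  | cons c t ih => simp [pvSmL, ih]

theorem pvSmL_headD (l : List Char) (h : l ≠ []) (d : Char) :
    (pvSmL l).headD d = pvMaxD l d := by
  induction l with
  | nil => exact absurd rfl h
  | cons c rest ih =>
    cases rest with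
    | nil => simp [pvSmL, pvMaxD]
    | cons r t =>
      have hne2 : pvSmL (r :: t) ≠ [] := pvSmL_ne_nil _ (by simp)
      calc (pvSmL (c :: r :: t)).headD d
          = max c ((pvSmL (r :: t)).headD c) := rfl
        _ = max c ((pvSmL (r :: t)).headD d) := by rw [pvHeadD_congr _ hne2 c d]
        _ = max c (pvMaxD (r :: t) d) := by rw [ih (by simp)]
        _ = pvMaxD (c :: r :: t) d := (pvMaxD_cons c (r :: t) (by simp) d d).symm

theorem pvSmL_getD (l : List Char) (i : Nat) (hi : i < l.length) (d : Char) :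
    (pvSmL l).getD i d = pvMaxD (l.drop i) d := by
  induction l generalizing i with
  | nil => simp at hi
  | cons c rest ih =>
    cases i with
    | zero =>
      have h1 : (pvSmL (c :: rest)).getD 0 d = max c ((pvSmL rest).headD c) := rfl
      rw [h1, List.drop_zero]
      cases rest with
      | nil => simp [pvSmL, pvMaxD]
      | cons r t =>
        rw [pvSmL_headD (r :: t) (by simp) c]
        exact (pvMaxD_cons c (r :: t) (by simp) d c).symm
    | succ j =>
      simp only [pvSmL, List.getD_cons_succ, List.drop_succ_cons]
      exact ih j (by simpa using hi)

theorem pvMaxD_drop_le (l : List Char) (j k : Nat) (hjk : j ≤ k) (h : l.drop k ≠ []) (d : Char) :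
    pvMaxD (l.drop k) d ≤ pvMaxD (l.drop j) d := by
  have hmem : pvMaxD (l.drop k) d ∈ l.drop j := by
    have h1 : pvMaxD (l.drop k) d ∈ (l.drop j).drop (k - j) := by
      rw [List.drop_drop, Nat.add_sub_cancel' hjk]
      exact pvMaxD_mem _ h d
    exact List.mem_of_mem_drop h1
  exact pvLe_maxD _ d _ hmem

theorem pvMax?_getD (l : List Char) (h : l ≠ []) (d : Char) :
    (PySem.List.max? l (fun y => y)).getD d = pvMaxD l d := by
  cases l with
  | nil => exact absurd rfl h
  | cons c t => rw [PySem.List.max?_id_cons]; rfl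

theorem pvSmFold (cs : List Char) (j : Nat) (hj : j ≤ cs.length - 1) :
    (PySem.List.pyRange ((j : Int) - 1) (-1) (-1)).foldl (pvA_smStep cs) (pvSmL (cs.drop j)) = pvSmL cs := by
  induction j with
  | zero =>
    rw [PySem.List.pyRange_neg_one_eq_nil (by norm_num)]
    simp
  | succ j ih =>
    have hjlt : j + 1 < cs.length := by omega
    have hdropne : cs.drop (j + 1) ≠ [] := by
      intro hnil
      have := List.length_drop (l := cs) (i := j + 1)
      rw [hnil] at this
      simp at this
      omega
    rw [show ((j + 1 : Nat) : Int) - 1 = ((j : Nat) : Int) by push_cast; ring]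
    rw [PySem.List.pyRange_neg_one_cons (by omega : (-1 : Int) < (j : Int))]
    simp only [List.foldl_cons]
    have hjlen : j < cs.length := by omega
    have hstep : pvA_smStep cs (pvSmL (cs.drop (j + 1))) ((j : Nat) : Int) = pvSmL (cs.drop j) := by
      have hg : cs[j] :: cs.drop (j + 1) = cs.drop j := List.getElem_cons_drop hjlen
      unfold pvA_smStep
      rw [PySem.List.pyGetD_eq_getElem cs ' ' (by positivity) (by exact_mod_cast hjlen)]
      simp only [Int.toNat_natCast]
      rw [← hg]
      have h2 : pvSmL (cs[j] :: cs.drop (j + 1))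
          = max cs[j] ((pvSmL (cs.drop (j + 1))).headD cs[j]) :: pvSmL (cs.drop (j + 1)) := rfl
      rw [h2, pvHeadD_congr _ (pvSmL_ne_nil _ hdropne) ' ' cs[j]]
    rw [hstep]
    exact ih (by omega)

theorem pvA_sm_eq (cs : List Char) (h2 : 2 ≤ cs.length) : pvA_sm cs = pvSmL cs := by
  have hne : cs ≠ [] := by intro h; rw [h] at h2; simp at h2
  unfold pvA_sm
  rw [PySem.List.pyGetD_neg_one cs ' ' hne]
  have hdrop : cs.drop (cs.length - 1) = [cs.getLast hne] := by
    have h1 : cs.length - 1 < cs.length := by omega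
    rw [← List.getElem_cons_drop h1, List.drop_eq_nil_of_le (by omega),
      List.getLast_eq_getElem]
  have hsm1 : pvSmL [cs.getLast hne] = [cs.getLast hne] := by simp [pvSmL]
  have hcast : (cs.length : Int) - 2 = ((cs.length - 1 : Nat) : Int) - 1 := by omega
  rw [hcast, ← hsm1, ← hdrop]
  exact pvSmFold cs (cs.length - 1) (le_refl _)

theorem pvPhaseKeep (cs sm : List Char) (b : Char × Char) (l : List Int)
    (h : ∀ i ∈ l, pvA_bestStep cs sm (some b) i = some b) :
    l.foldl (pvA_bestStep cs sm) (some b) = some b := by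
  induction l with
  | nil => rfl
  | cons x t ih =>
    simp only [List.foldl_cons]
    rw [h x (by simp)]
    exact ih (fun i hi => h i (by simp [hi]))

theorem pvPhase1 (cs sm : List Char) (m : Char) (l : List Int)
    (h : ∀ i ∈ l, PySem.List.pyGetD cs i ' ' < m) (st : Option (Char × Char))
    (hst : st = none ∨ ∃ b, st = some b ∧ b.1 < m) :
    l.foldl (pvA_bestStep cs sm) st = none ∨
      ∃ b, l.foldl (pvA_bestStep cs sm) st = some b ∧ b.1 < m := by
  induction l generalizing st with
  | nil => simpa using hst
  | cons x t ih =>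
    simp only [List.foldl_cons]
    apply ih (fun i hi => h i (by simp [hi]))
    have hx := h x (by simp)
    rcases hst with rfl | ⟨b, rfl, hb⟩
    · exact Or.inr ⟨_, rfl, hx⟩
    · unfold pvA_bestStep
      simp only
      split
      · exact Or.inr ⟨_, rfl, hx⟩
      · exact Or.inr ⟨b, rfl, hb⟩

theorem pvA_best_eq (cs : List Char) (k : Nat) (h2 : 2 ≤ cs.length)
    (hk1 : k < cs.length - 1)
    (hck : cs[k]'(by omega) = pvMaxD cs.dropLast ' ')
    (hfirst : ∀ j (hj : j < k), cs[j]'(by omega) ≠ pvMaxD cs.dropLast ' ') :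
    (PySem.List.pyRange 0 ((cs.length : Int) - 1) 1).foldl (pvA_bestStep cs (pvSmL cs)) none
      = some (pvMaxD cs.dropLast ' ', pvMaxD (cs.drop (k + 1)) ' ') := by
  have hDlen : cs.dropLast.length = cs.length - 1 := List.length_dropLast
  have hfstD : ∀ (i : Nat) (hi : i < cs.length - 1), cs[i]'(by omega) ≤ pvMaxD cs.dropLast ' ' := by
    intro i hi
    have hi' : i < cs.dropLast.length := by omega
    have : cs.dropLast[i] ∈ cs.dropLast := List.getElem_mem hi'
    rw [List.getElem_dropLast] at this
    exact pvLe_maxD _ ' ' _ this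
  have hpy : ∀ (i : Int) (h0 : 0 ≤ i) (h1 : i < (cs.length : Int) - 1),
      PySem.List.pyGetD cs i ' ' = cs[i.toNat]'(by omega) := by
    intro i h0 h1
    exact PySem.List.pyGetD_eq_getElem cs ' ' h0 (by omega)
  have hsec : ∀ (i : Int), 0 ≤ i → i < (cs.length : Int) - 1 →
      PySem.List.pyGetD (pvSmL cs) (i + 1) ' ' = pvMaxD (cs.drop (i.toNat + 1)) ' ' := by
    intro i h0 h1
    have hlen : (i + 1) < ((pvSmL cs).length : Int) := by rw [pvSmL_length]; omega
    rw [PySem.List.pyGetD_eq_getElem (pvSmL cs) ' ' (by omega) hlen]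
    have ht : (i + 1).toNat = i.toNat + 1 := by omega
    have hlt : (i + 1).toNat < (pvSmL cs).length := by omega
    rw [← List.getD_eq_getElem (pvSmL cs) ' ' hlt, ht,
      pvSmL_getD cs (i.toNat + 1) (by rw [pvSmL_length] at hlt; omega) ' ']
  have hsplit1 : (0 : Int) ≤ (k : Int) := by positivity
  have hsplit2 : (k : Int) ≤ (cs.length : Int) - 1 := by omega
  rw [PySem.List.pyRange_one_append 0 (k : Int) ((cs.length : Int) - 1) hsplit1 hsplit2,
    PySem.List.pyRange_one_cons (by omega : (k : Int) < (cs.length : Int) - 1),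
    List.foldl_append, List.foldl_cons]
  have hphase1 := pvPhase1 cs (pvSmL cs) (pvMaxD cs.dropLast ' ') (PySem.List.pyRange 0 (k : Int) 1)
    (by
      intro i hi
      rw [PySem.List.mem_pyRange_one] at hi
      rw [hpy i hi.1 (by omega)]
      exact lt_of_le_of_ne (hfstD i.toNat (by omega)) (hfirst i.toNat (by omega)))
    none (Or.inl rfl)
  have hstepk : ∀ (st : Option (Char × Char)),
      (st = none ∨ ∃ b, st = some b ∧ b.1 < pvMaxD cs.dropLast ' ') →
      pvA_bestStep cs (pvSmL cs) st (k : Int)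
        = some (pvMaxD cs.dropLast ' ', pvMaxD (cs.drop (k + 1)) ' ') := by
    intro st hst
    unfold pvA_bestStep
    rw [hpy (k : Int) (by positivity) (by omega), hsec (k : Int) (by positivity) (by omega)]
    simp only [Int.toNat_natCast]
    rcases hst with rfl | ⟨b, rfl, hb⟩
    · simp [hck]
    · simp only
      rw [if_pos (Or.inl (by rw [hck] at *; exact hb))]
      rw [hck]
  rcases hphase1 with hp | ⟨b, hp, hbm⟩ <;> rw [hp, hstepk _ (by simp [*])] <;>
    · apply pvPhaseKeep
      intro i hi
      rw [PySem.List.mem_pyRange_one] at hi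
      obtain ⟨hi1, hi2⟩ := hi
      have h0i : (0 : Int) ≤ i := by omega
      have hfle : cs[i.toNat]'(by omega) ≤ pvMaxD cs.dropLast ' ' := hfstD i.toNat (by omega)
      have hdropne : cs.drop (i.toNat + 1) ≠ [] := by
        intro hnil
        have := congrArg List.length hnil
        simp at this
        omega
      have hsle : pvMaxD (cs.drop (i.toNat + 1)) ' ' ≤ pvMaxD (cs.drop (k + 1)) ' ' :=
        pvMaxD_drop_le cs (k + 1) (i.toNat + 1) (by omega) hdropne ' '
      unfold pvA_bestStep
      rw [hpy i h0i (by omega), hsec i h0i (by omega)]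
      simp only
      rw [if_neg]
      push Not
      exact ⟨hfle, fun _ => hsle⟩

theorem pvPortsEq (bank : String) :
    best_two_digit_subsequence bank = best_two_digit_subsequence_alt bank := by
  simp only [best_two_digit_subsequence, best_two_digit_subsequence_alt]
  by_cases h0 : bank.toList.length = 0
  · rw [if_pos h0, if_pos h0]
  · rw [if_neg h0, if_neg h0]
    by_cases h1 : bank.toList.length = 1
    · rw [if_pos h1, if_pos h1]
    · rw [if_neg h1, if_neg h1]
      have h2 : 2 ≤ bank.toList.length := by omega
      set cs := bank.toList with hcs
      have hne : cs ≠ [] := by intro h; rw [h] at h2; simp at h2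
      have hD : cs.dropLast ≠ [] := by
        intro h
        have := congrArg List.length h
        simp at this
        omega
      rw [PySem.List.slice_to_neg_one, pvMax?_getD _ hD ' ']
      have hmcs : pvMaxD cs.dropLast ' ' ∈ cs := List.dropLast_subset cs (pvMaxD_mem _ hD ' ')
      obtain ⟨k, hk⟩ := Option.isSome_iff_exists.mp
        ((PySem.List.index?_isSome_iff (xs := cs) (v := pvMaxD cs.dropLast ' ')).mpr hmcs)
      rw [hk]
      simp only [Option.getD_some]
      obtain ⟨hklt, hck, hfirst⟩ := PySem.List.getElem_of_index?_eq_some hk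
      have hkn1 : k < cs.length - 1 := by
        obtain ⟨j, hj, hjm⟩ := List.getElem_of_mem (pvMaxD_mem _ hD ' ')
        have hjlen : j < cs.length - 1 := by
          have := List.length_dropLast (xs := cs)
          omega
        by_contra hcon
        rw [List.getElem_dropLast] at hjm
        exact hfirst j (by omega) hjm
      have hc1 : ((k : Int) + 1) = ((k + 1 : Nat) : Int) := by push_cast; ring
      rw [hc1, PySem.List.slice_from cs (by positivity), Int.toNat_natCast]
      have hdropk : cs.drop (k + 1) ≠ [] := by
        intro h
        have := congrArg List.length h
        simp at this
        omega
      rw [pvMax?_getD _ hdropk ' ', pvA_sm_eq cs h2,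
        pvA_best_eq cs k h2 hkn1 hck (fun j hj => hfirst j hj)]

-- ===== VERDICT (by name: the statement is the Claim_ definition above) =====
theorem best_two_digit_subsequence_spec : Claim_equal_best_two_digit_subsequence := by
  intro bank _ _
  unfold Spec_best_two_digit_subsequence
  exact pvPortsEq bank
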